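-- pv_equiv track=rewrite | github.com/CyberVines/Universal-Quantum-Cymatics | UQC/transmit_modes.py | block_interleave
-- ===== SOURCE A (Python) =====
-- def block_interleave(bits, cols):
--     """Block interleaver: write by rows, read by columns."""
--     rows = (len(bits) + cols - 1) // cols
--     padded = bits + [0] * (rows * cols - len(bits))
--     out = []
--     for c in range(cols):
--         for r in range(rows):
--             out.append(padded[r * cols + c])
--     return out
-- ===== SOURCE B (Python) =====
-- def block_interleave(bits, cols):
--     """Block interleaver: scatter each bit into its column bucket in one pass,
--     then concatenate the buckets, zero-filling each short column."""
--     rows = (len(bits) + cols - 1) // cols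
--     buckets = {}
--     for i, b in enumerate(bits):
--         buckets.setdefault(i % cols, []).append(b)
--     out = []
--     for c in range(cols):
--         col = buckets.get(c, [])
--         out += col + [0] * (rows - len(col))
--     return out
-- ===== Notes on version B (the rewrite author's own statement) =====
-- stated objective: alternative
-- what changed: A pads the list to a full rows*cols matrix and gathers output with nested loops computing padded[r*cols+c]; B never builds the padded matrix: one pass scatters each bit into a per-column dict bucket keyed by i % cols, then the buckets are concatenated with per-column zero fill.
import Mathlib
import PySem

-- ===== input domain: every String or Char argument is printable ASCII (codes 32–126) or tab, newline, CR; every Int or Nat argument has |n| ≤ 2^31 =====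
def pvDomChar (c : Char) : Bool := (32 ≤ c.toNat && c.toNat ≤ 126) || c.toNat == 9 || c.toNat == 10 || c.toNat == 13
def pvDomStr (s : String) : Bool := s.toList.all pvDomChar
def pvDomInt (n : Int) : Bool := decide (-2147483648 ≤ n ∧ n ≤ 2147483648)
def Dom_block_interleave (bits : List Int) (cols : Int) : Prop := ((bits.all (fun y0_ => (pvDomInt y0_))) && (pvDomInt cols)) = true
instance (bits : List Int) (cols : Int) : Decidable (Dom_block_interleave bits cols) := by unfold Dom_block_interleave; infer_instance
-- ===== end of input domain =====

-- B replaces A's padded-matrix gather (nested loops over padded[r*cols+c]) by a one-pass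
-- scatter into per-column dict buckets, concatenated with per-column zero fill
-- (objective: alternative; same asymptotic cost).


-- ===== PORT A =====
-- padded[r*cols+c] is ported as pyGetD …; under Pre_ the index is always in range, so the
-- default 0 is never produced.
def block_interleave (bits : List Int) (cols : Int) : List Int :=
  let rows := PySem.Int.floordiv (PySem.List.len bits + cols - 1) cols
  let padded := bits ++ List.replicate (rows * cols - PySem.List.len bits).toNat 0
  (PySem.List.pyRange 0 cols 1).foldl
    (fun out c =>
      (PySem.List.pyRange 0 rows 1).foldl
        (fun out r => out ++ [PySem.List.pyGetD padded (r * cols + c) 0]) out)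
    []

-- ===== PORT B =====
-- buckets.setdefault(i % cols, []).append(b) mutates the bucket in place; its value-level
-- port is Dict.modify with default [] appending [b].
def block_interleave_alt (bits : List Int) (cols : Int) : List Int :=
  let rows := PySem.Int.floordiv (PySem.List.len bits + cols - 1) cols
  let buckets := (PySem.List.enumerate bits).foldl
    (fun d p => PySem.Dict.modify d (PySem.Int.mod p.1 cols) [] (· ++ [p.2]))
    PySem.Dict.empty
  (PySem.List.pyRange 0 cols 1).foldl
    (fun out c =>
      let col := PySem.Dict.getD buckets c []
      out ++ (col ++ List.replicate (rows - PySem.List.len col).toNat 0))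
    []

-- ===== PRECONDITION & SPEC =====
-- Pre_ excludes exactly cols = 0, where A raises ZeroDivisionError.
def Pre_block_interleave (bits : List Int) (cols : Int) : Prop := cols ≠ 0
instance (bits : List Int) (cols : Int) : Decidable (Pre_block_interleave bits cols) := by
  unfold Pre_block_interleave; infer_instance

def pvWitness_block_interleave : List Int × Int := ([1, 0, 1, 1, 0], 2)

def Spec_block_interleave (bits : List Int) (cols : Int) (out : List Int) : Prop := out = block_interleave_alt bits cols
instance (bits : List Int) (cols : Int) (out : List Int) : Decidable (Spec_block_interleave bits cols out) := by unfold Spec_block_interleave; infer_instance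

-- ===== CLAIM (what is proved, stated in full; the proofs are below) =====
def Claim_equal_block_interleave : Prop := ∀ (bits : List Int) (cols : Int), Dom_block_interleave bits cols → Pre_block_interleave bits cols → Spec_block_interleave bits cols (block_interleave bits cols)

-- ===== LEMMAS AND PROOFS =====

theorem filter_range_beq (s c : Nat) :
    (List.range s).filter (fun i => i == c) = if c < s then [c] else [] := by
  induction s with
  | zero => simp
  | succ s ih =>
    rw [List.range_succ, List.filter_append, ih]
    by_cases h : c < s
    · rw [if_pos h, if_pos (by omega)]
      simp [Nat.ne_of_gt h]
    · by_cases h2 : c = s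
      · subst h2; simp
      · rw [if_neg h, if_neg (by omega)]
        simp [Ne.symm h2]

theorem filter_range_mod_small (C c s : Nat) (hs : s ≤ C) :
    (List.range s).filter (fun i => i % C == c) = if c < s then [c] else [] := by
  rw [← filter_range_beq s c]
  apply List.filter_congr
  intro i hi
  have : i < C := lt_of_lt_of_le (List.mem_range.mp hi) hs
  rw [Nat.mod_eq_of_lt this]

theorem filter_range_mod (C c : Nat) (hc : c < C) (q s : Nat) (hs : s < C) :
    (List.range (q * C + s)).filter (fun i => i % C == c)
      = (List.range (q + if c < s then 1 else 0)).map (fun r => r * C + c) := by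
  induction q with
  | zero =>
    rw [Nat.zero_mul, Nat.zero_add, filter_range_mod_small C c s (le_of_lt hs)]
    by_cases h : c < s <;> simp [h]
  | succ q ih =>
    have hsplit : (q + 1) * C + s = C + (q * C + s) := by ring
    rw [hsplit, List.range_add, List.filter_append, List.filter_map]
    have hblk : (List.range C).filter (fun i => i % C == c) = [c] := by
      rw [filter_range_mod_small C c C le_rfl, if_pos hc]
    have hpred : ((fun i => i % C == c) ∘ (fun j => C + j)) = (fun i => i % C == c) := by
      funext j; simp [Function.comp, Nat.add_mod_left]
    rw [hblk, hpred, ih]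
    rw [show q + 1 + (if c < s then 1 else 0) = (q + (if c < s then 1 else 0)) + 1 by omega,
      List.range_succ_eq_map]
    rw [List.singleton_append, List.map_cons, List.map_map, List.map_map]
    simp only [Nat.zero_mul, Nat.zero_add]
    congr 1
    apply List.map_congr_left
    intro r _
    simp only [Function.comp, Nat.succ_mul]
    ring

-- the positive-cols per-column identity: A's gathered column equals B's bucket plus zero fill
theorem column_eq (bits : List Int) (C c R : Nat) (hc : c < C) (hCpos : 0 < C)
    (hR : bits.length ≤ R * C) (hRlo : R * C < bits.length + C) :
    (List.range R).map (fun (r : Nat) => PySem.List.pyGetD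
        (bits ++ List.replicate (R * C - bits.length) 0) ((r : Int) * (C : Int) + (c : Int)) 0)
      = (((List.range bits.length).filter (fun i => i % C == c)).map (fun i => bits.getD i 0))
        ++ List.replicate (R - ((List.range bits.length).filter (fun i => i % C == c)).length) 0 := by
  set n := bits.length with hn
  obtain ⟨q, s, hqs, hsC⟩ : ∃ q s, n = q * C + s ∧ s < C :=
    ⟨n / C, n % C, by rw [Nat.mul_comm]; exact (Nat.div_add_mod n C).symm, Nat.mod_lt _ hCpos⟩
  have hfil := filter_range_mod C c hc q s hsC
  rw [← hqs] at hfil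
  set cnt := q + (if c < s then 1 else 0) with hcnt
  have hReq : R = q + (if 0 < s then 1 else 0) := by
    by_cases h0 : 0 < s
    · rw [if_pos h0]
      nlinarith [hR, hRlo, hqs]
    · rw [if_neg h0]
      have hs0 : s = 0 := by omega
      nlinarith [hR, hRlo, hqs, hs0]
  have hcle : cnt ≤ R := by
    rw [hcnt, hReq]; split_ifs <;> omega
  rw [hfil, List.map_map, List.length_map, List.length_range]
  have hRsplit : R = cnt + (R - cnt) := by omega
  rw [hRsplit, List.range_add, List.map_append, List.map_map]
  rw [← hRsplit]
  congr 1
  · -- low part: indices below n read bits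
    apply List.map_congr_left
    intro r hr
    have hrcnt : r < cnt := List.mem_range.mp hr
    have hlt : r * C + c < n := by
      rw [hqs]; rw [hcnt] at hrcnt
      by_cases h : c < s
      · rw [if_pos h] at hrcnt; nlinarith
      · rw [if_neg h] at hrcnt; nlinarith [Nat.not_lt.mp h]
    have hcast : (r : Int) * (C : Int) + (c : Int) = ((r * C + c : Nat) : Int) := by push_cast; ring
    simp only [Function.comp]
    rw [hcast, PySem.List.pyGetD_natCast]
    rw [List.getD_eq_getElem _ _ (by rw [List.length_append, List.length_replicate]; omega),
      List.getD_eq_getElem _ _ (by omega : r * C + c < bits.length)]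
    rw [List.getElem_append_left (by omega)]
  · -- high part: indices at or past n read the replicate zeros
    have hzero : ∀ j ∈ List.range (R - cnt), ((fun (r : Nat) => PySem.List.pyGetD
        (bits ++ List.replicate (R * C - n) 0) ((r : Int) * (C : Int) + (c : Int)) 0) ∘
        (fun x => cnt + x)) j = 0 := by
      intro j hj
      have hjlt : j < R - cnt := List.mem_range.mp hj
      have hrR : cnt + j < R := by omega
      have hge : n ≤ (cnt + j) * C + c := by
        rw [hqs]; rw [hcnt]
        by_cases h : c < s
        · rw [if_pos h]; nlinarith
        · rw [if_neg h]; nlinarith [Nat.not_lt.mp h]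
      have hltRC : (cnt + j) * C + c < R * C := by nlinarith
      have hcast : ((cnt + j : Nat) : Int) * (C : Int) + (c : Int)
          = (((cnt + j) * C + c : Nat) : Int) := by push_cast; ring
      simp only [Function.comp]
      rw [hcast, PySem.List.pyGetD_natCast]
      rw [List.getD_eq_getElem _ _ (by rw [List.length_append, List.length_replicate]; omega)]
      rw [List.getElem_append_right (by omega)]
      simp
    refine List.eq_replicate_iff.mpr ⟨by simp, ?_⟩
    intro b hb
    obtain ⟨j, hj, rfl⟩ := List.mem_map.mp hb
    exact hzero j (List.mem_range.mpr (by simpa using hj))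

theorem key_eq (bits : List Int) (cols : Int) (hc : cols ≠ 0) :
    block_interleave bits cols = block_interleave_alt bits cols := by
  unfold block_interleave block_interleave_alt
  simp only [PySem.List.len_eq]
  set n : Int := (bits.length : Int) with hn
  set rows := PySem.Int.floordiv (n + cols - 1) cols with hrows
  rcases lt_or_gt_of_ne hc with hneg | hpos
  · -- cols < 0 : both loops fold over the empty range(cols)
    rw [PySem.List.pyRange_one_eq_nil (le_of_lt hneg)]
    simp
  · -- cols > 0
    have hcpos : 0 < cols := hpos
    have hmod := PySem.Int.floordiv_mul_add_mod (n + cols - 1) cols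
    have h1 := PySem.Int.mod_nonneg (n + cols - 1) hcpos
    have h2 := PySem.Int.mod_lt (n + cols - 1) hcpos
    rw [← hrows] at hmod
    have hnnn : (0:Int) ≤ n := by rw [hn]; exact_mod_cast Nat.zero_le _
    have hrnn : 0 ≤ rows := by
      rw [hrows, PySem.Int.floordiv_eq_ediv_of_pos hcpos]
      exact Int.ediv_nonneg (by omega) (le_of_lt hcpos)
    obtain ⟨R, hR⟩ : ∃ R : Nat, rows = (R : Int) := ⟨rows.toNat, by omega⟩
    obtain ⟨C, hC⟩ : ∃ C : Nat, cols = (C : Int) := ⟨cols.toNat, by omega⟩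
    have hCpos : 0 < C := by omega
    have hge : n ≤ rows * cols := by omega
    have hlo : rows * cols < n + cols := by omega
    have hrcInt : rows * cols = ((R * C : Nat) : Int) := by rw [hR, hC]; push_cast; ring
    have hgeN : bits.length ≤ R * C := by
      rw [hrcInt, hn] at hge; exact_mod_cast hge
    have hloN : R * C < bits.length + C := by
      rw [hrcInt, hn, hC] at hlo; exact_mod_cast hlo
    have hpadlen : (rows * cols - n).toNat = R * C - bits.length := by
      rw [hrcInt, hn]; omega
    rw [hpadlen, hR, hC]
    -- B's buckets: characterize getD via the grouping lemma
    have hbucket : ∀ c : Nat, PySem.Dict.getD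
        ((PySem.List.enumerate bits).foldl
          (fun d p => PySem.Dict.modify d (PySem.Int.mod p.1 ((C : Nat) : Int)) [] (· ++ [p.2]))
          PySem.Dict.empty) ((c : Nat) : Int) []
        = ((List.range bits.length).filter (fun i => i % C == c)).map (fun i => bits.getD i 0) := by
      intro c
      have hfold : (PySem.List.enumerate bits).foldl
          (fun d p => PySem.Dict.modify d (PySem.Int.mod p.1 ((C : Nat) : Int)) [] (· ++ [p.2]))
          PySem.Dict.empty
          = ((PySem.List.enumerate bits).map
              (fun p : Int × Int => (PySem.Int.mod p.1 ((C : Nat) : Int), p.2))).foldl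
            (fun (d : PySem.Dict Int (List Int)) p => PySem.Dict.modify d p.1 [] (· ++ [p.2]))
            PySem.Dict.empty := by rw [List.foldl_map]
      rw [hfold, PySem.Dict.getD_foldl_modify_append, PySem.Dict.getD_empty, List.nil_append]
      rw [PySem.List.enumerate_eq_map_pyRange bits 0, PySem.List.len_eq,
        PySem.List.pyRange_zero_natCast]
      simp only [List.map_map, List.filter_map, Function.comp_def]
      have hpr : ∀ i ∈ List.range bits.length,
          ((PySem.Int.mod ((i : Nat) : Int) ((C : Nat) : Int), PySem.List.pyGetD bits ((i : Nat) : Int) 0).1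
            == ((c : Nat) : Int)) = (i % C == c) := by
        intro i _
        simp only [PySem.Int.mod_natCast]
        by_cases h : i % C = c
        · simp [h]
        · rw [beq_eq_false_iff_ne.mpr (fun hcast => h (by exact_mod_cast hcast : i % C = c)),
            beq_eq_false_iff_ne.mpr h]
      rw [List.filter_congr hpr]
      apply List.map_congr_left
      intro i _
      exact PySem.List.pyGetD_natCast bits i 0
    -- fold both sides into flatMaps over range C and compare per column
    simp only [PySem.List.pyRange_zero_natCast]
    simp only [List.foldl_map]
    simp only [PySem.List.foldl_append_singleton_eq_map]
    simp only [PySem.List.foldl_append_eq_flatMap]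
    simp only [List.nil_append]
    apply List.flatMap_congr
    intro c hcmem
    have hcC : c < C := List.mem_range.mp hcmem
    rw [hbucket c, column_eq bits C c R hcC hCpos hgeN hloN]
    congr 2
    rw [List.length_map]
    omega

-- ===== VERDICT (by name: the statement is the Claim_ definition above) =====
theorem block_interleave_spec : Claim_equal_block_interleave := by
  intro bits cols _ hpre
  unfold Spec_block_interleave
  exact key_eq bits cols hpre
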